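-- pv_equiv track=rewrite | github.com/immersinn/nfl_analytics | core/fantasy.py | scorePointsAllowed
-- ===== SOURCE A (Python) =====
-- def scorePointsAllowed(points):
--     """
--     · 0 points allowed = 5pts
--     · 1-6 points allowed = 4pts
--     · 7-13 points allowed = 3pts
--     · 14-17 points allowed = 1pts
--     · 18-27 points allowed = 0pts
--     · 28-34 points allowed = -1pts
--     · 35-45 points allowed = -3pts
--     · 46+ points allowed = -5pts
--     """
--     pts = 0
--     for p in points:
--         p = int(p)
--         if p > 45:
--             pts += -5
--         elif p > 35:
--             pts += -3
--         elif p > 27: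
--             pts += -1
--         elif p > 17:
--             pts += 0
--         elif p > 14:
--             pts += 1
--         elif p > 6:
--             pts += 3
--         elif p > 0:
--             pts += 4
--         elif p == 0:
--             pts += 5
--         else:
--             err_msg = "Invalid value for 'points'"
--             raise ValueError(err_msg)
--     return(pts)
-- ===== SOURCE B (Python) =====
-- _DROPS = ((1, 1), (7, 1), (15, 2), (18, 1), (28, 1), (36, 2), (46, 2))
--
-- def scorePointsAllowed(points):
--     vals = [int(p) for p in points]
--     if any(v < 0 for v in vals):
--         raise ValueError("Invalid value for 'points'")
--     total = 5 * len(vals)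
--     for bound, drop in _DROPS:
--         total -= drop * sum(1 for v in vals if v >= bound)
--     return total
-- ===== Notes on version B (the rewrite author's own statement) =====
-- stated objective: alternative
-- what changed: Instead of classifying each element into a score bucket and summing per-element scores, B starts from 5 points per game and, in seven per-boundary counting passes, subtracts each threshold's score drop times the count of games at or above that threshold (total = 5*n - sum_j drop_j * |{v >= bound_j}|).
import Mathlib
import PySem

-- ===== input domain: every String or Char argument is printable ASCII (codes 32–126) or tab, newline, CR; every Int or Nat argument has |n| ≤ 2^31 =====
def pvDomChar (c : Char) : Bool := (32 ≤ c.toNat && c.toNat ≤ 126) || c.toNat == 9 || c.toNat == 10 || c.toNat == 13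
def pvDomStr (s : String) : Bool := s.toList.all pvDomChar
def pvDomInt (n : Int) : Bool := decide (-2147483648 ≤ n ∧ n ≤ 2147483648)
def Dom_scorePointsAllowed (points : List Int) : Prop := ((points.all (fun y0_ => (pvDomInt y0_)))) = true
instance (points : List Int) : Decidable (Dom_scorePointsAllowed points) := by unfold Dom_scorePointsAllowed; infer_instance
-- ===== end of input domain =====

-- B replaces A's per-element if/elif bucket classification by an arithmetic decomposition: 5 points per game minus, for each of seven thresholds, its score drop times the count of games at or above it (per-boundary counting passes); same O(n) cost.


-- ===== PORT A =====
-- literal transliteration of A's if/elif cascade; the final 'else' branch is where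
-- Python raises ValueError (negative p), which Pre_ excludes: there the fold adds 0.
def scorePointsAllowed (points : List Int) : Int :=
  points.foldl (fun pts p =>
    if p > 45 then pts + (-5)
    else if p > 35 then pts + (-3)
    else if p > 27 then pts + (-1)
    else if p > 17 then pts + 0
    else if p > 14 then pts + 1
    else if p > 6 then pts + 3
    else if p > 0 then pts + 4
    else if p = 0 then pts + 5
    else pts) 0

-- ===== PORT B =====
def pvDrops : List (Int × Int) := [(1, 1), (7, 1), (15, 2), (18, 1), (28, 1), (36, 2), (46, 2)]
-- Source B raises ValueError when some value is negative (excluded by Pre_); the port returns 0 there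
def scorePointsAllowed_alt (points : List Int) : Int :=
  if points.any (fun v => v < 0) then 0
  else pvDrops.foldl
    (fun total bd => total - bd.2 * ((points.countP (fun v => bd.1 ≤ v) : Int)))
    (5 * points.length)

-- ===== PRECONDITION & SPEC =====
-- Pre_ excludes lists containing a negative value, on which Python A (and B) raise ValueError.
def Pre_scorePointsAllowed (points : List Int) : Prop := points.all (fun p => 0 ≤ p) = true
instance (points : List Int) : Decidable (Pre_scorePointsAllowed points) := by unfold Pre_scorePointsAllowed; infer_instance
def pvWitness_scorePointsAllowed : List Int := [0, 3, 14, 17, 28, 35, 46]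
def Spec_scorePointsAllowed (points : List Int) (out : Int) : Prop := out = scorePointsAllowed_alt points
instance (points : List Int) (out : Int) : Decidable (Spec_scorePointsAllowed points out) := by unfold Spec_scorePointsAllowed; infer_instance

-- ===== CLAIM (what is proved, stated in full; the proofs are below) =====
def Claim_equal_scorePointsAllowed : Prop := ∀ (points : List Int), Dom_scorePointsAllowed points → Pre_scorePointsAllowed points → Spec_scorePointsAllowed points (scorePointsAllowed points)

-- ===== LEMMAS AND PROOFS =====

-- closed form of B's fold over the seven literal (bound, drop) pairs
theorem pvAlt_closed (points : List Int) (h : points.any (fun v => v < 0) = false) :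
    scorePointsAllowed_alt points =
      5 * points.length
        - (points.countP (fun v => (1:Int) ≤ v) : Int)
        - (points.countP (fun v => (7:Int) ≤ v) : Int)
        - 2 * (points.countP (fun v => (15:Int) ≤ v) : Int)
        - (points.countP (fun v => (18:Int) ≤ v) : Int)
        - (points.countP (fun v => (28:Int) ≤ v) : Int)
        - 2 * (points.countP (fun v => (36:Int) ≤ v) : Int)
        - 2 * (points.countP (fun v => (46:Int) ≤ v) : Int) := by
  unfold scorePointsAllowed_alt pvDrops
  rw [if_neg (by simp [h])]
  simp only [List.foldl_cons, List.foldl_nil]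
  ring

-- per-element value of A's cascade, written as 5 minus threshold-indicator drops
theorem pvStepVal (acc p : Int) (hp : 0 ≤ p) :
    (if p > 45 then acc + (-5)
      else if p > 35 then acc + (-3)
      else if p > 27 then acc + (-1)
      else if p > 17 then acc + 0
      else if p > 14 then acc + 1
      else if p > 6 then acc + 3
      else if p > 0 then acc + 4
      else if p = 0 then acc + 5
      else acc)
    = acc + 5 - (if (1:Int) ≤ p then 1 else 0) - (if (7:Int) ≤ p then 1 else 0)
        - 2 * (if (15:Int) ≤ p then 1 else 0) - (if (18:Int) ≤ p then 1 else 0)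
        - (if (28:Int) ≤ p then 1 else 0) - 2 * (if (36:Int) ≤ p then 1 else 0)
        - 2 * (if (46:Int) ≤ p then 1 else 0) := by
  rcases lt_or_ge p 1 with h0 | h0
  · simp only [show ¬((45:Int) < p) from by omega, show ¬((35:Int) < p) from by omega, show ¬((27:Int) < p) from by omega, show ¬((17:Int) < p) from by omega, show ¬((14:Int) < p) from by omega, show ¬((6:Int) < p) from by omega, show ¬((0:Int) < p) from by omega, show p = 0 from by omega, show ¬((1:Int) ≤ p) from by omega, show ¬((7:Int) ≤ p) from by omega, show ¬((15:Int) ≤ p) from by omega, show ¬((18:Int) ≤ p) from by omega, show ¬((28:Int) ≤ p) from by omega, show ¬((36:Int) ≤ p) from by omega, show ¬((46:Int) ≤ p) from by omega, if_true, if_false, ite_true, ite_false]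
    omega
  rcases lt_or_ge p 7 with h1 | h1
  · simp only [show ¬((45:Int) < p) from by omega, show ¬((35:Int) < p) from by omega, show ¬((27:Int) < p) from by omega, show ¬((17:Int) < p) from by omega, show ¬((14:Int) < p) from by omega, show ¬((6:Int) < p) from by omega, show (0:Int) < p from by omega, show ¬(p = 0) from by omega, show (1:Int) ≤ p from by omega, show ¬((7:Int) ≤ p) from by omega, show ¬((15:Int) ≤ p) from by omega, show ¬((18:Int) ≤ p) from by omega, show ¬((28:Int) ≤ p) from by omega, show ¬((36:Int) ≤ p) from by omega, show ¬((46:Int) ≤ p) from by omega, if_true, if_false, ite_true, ite_false]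
    omega
  rcases lt_or_ge p 15 with h2 | h2
  · simp only [show ¬((45:Int) < p) from by omega, show ¬((35:Int) < p) from by omega, show ¬((27:Int) < p) from by omega, show ¬((17:Int) < p) from by omega, show ¬((14:Int) < p) from by omega, show (6:Int) < p from by omega, show (0:Int) < p from by omega, show ¬(p = 0) from by omega, show (1:Int) ≤ p from by omega, show (7:Int) ≤ p from by omega, show ¬((15:Int) ≤ p) from by omega, show ¬((18:Int) ≤ p) from by omega, show ¬((28:Int) ≤ p) from by omega, show ¬((36:Int) ≤ p) from by omega, show ¬((46:Int) ≤ p) from by omega, if_true, if_false, ite_true, ite_false]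
    omega
  rcases lt_or_ge p 18 with h3 | h3
  · simp only [show ¬((45:Int) < p) from by omega, show ¬((35:Int) < p) from by omega, show ¬((27:Int) < p) from by omega, show ¬((17:Int) < p) from by omega, show (14:Int) < p from by omega, show (6:Int) < p from by omega, show (0:Int) < p from by omega, show ¬(p = 0) from by omega, show (1:Int) ≤ p from by omega, show (7:Int) ≤ p from by omega, show (15:Int) ≤ p from by omega, show ¬((18:Int) ≤ p) from by omega, show ¬((28:Int) ≤ p) from by omega, show ¬((36:Int) ≤ p) from by omega, show ¬((46:Int) ≤ p) from by omega, if_true, if_false, ite_true, ite_false]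
    omega
  rcases lt_or_ge p 28 with h4 | h4
  · simp only [show ¬((45:Int) < p) from by omega, show ¬((35:Int) < p) from by omega, show ¬((27:Int) < p) from by omega, show (17:Int) < p from by omega, show (14:Int) < p from by omega, show (6:Int) < p from by omega, show (0:Int) < p from by omega, show ¬(p = 0) from by omega, show (1:Int) ≤ p from by omega, show (7:Int) ≤ p from by omega, show (15:Int) ≤ p from by omega, show (18:Int) ≤ p from by omega, show ¬((28:Int) ≤ p) from by omega, show ¬((36:Int) ≤ p) from by omega, show ¬((46:Int) ≤ p) from by omega, if_true, if_false, ite_true, ite_false]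
    omega
  rcases lt_or_ge p 36 with h5 | h5
  · simp only [show ¬((45:Int) < p) from by omega, show ¬((35:Int) < p) from by omega, show (27:Int) < p from by omega, show (17:Int) < p from by omega, show (14:Int) < p from by omega, show (6:Int) < p from by omega, show (0:Int) < p from by omega, show ¬(p = 0) from by omega, show (1:Int) ≤ p from by omega, show (7:Int) ≤ p from by omega, show (15:Int) ≤ p from by omega, show (18:Int) ≤ p from by omega, show (28:Int) ≤ p from by omega, show ¬((36:Int) ≤ p) from by omega, show ¬((46:Int) ≤ p) from by omega, if_true, if_false, ite_true, ite_false]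
    omega
  rcases lt_or_ge p 46 with h6 | h6
  · simp only [show ¬((45:Int) < p) from by omega, show (35:Int) < p from by omega, show (27:Int) < p from by omega, show (17:Int) < p from by omega, show (14:Int) < p from by omega, show (6:Int) < p from by omega, show (0:Int) < p from by omega, show ¬(p = 0) from by omega, show (1:Int) ≤ p from by omega, show (7:Int) ≤ p from by omega, show (15:Int) ≤ p from by omega, show (18:Int) ≤ p from by omega, show (28:Int) ≤ p from by omega, show (36:Int) ≤ p from by omega, show ¬((46:Int) ≤ p) from by omega, if_true, if_false, ite_true, ite_false]
    omega
  simp only [show (45:Int) < p from by omega, show (35:Int) < p from by omega, show (27:Int) < p from by omega, show (17:Int) < p from by omega, show (14:Int) < p from by omega, show (6:Int) < p from by omega, show (0:Int) < p from by omega, show ¬(p = 0) from by omega, show (1:Int) ≤ p from by omega, show (7:Int) ≤ p from by omega, show (15:Int) ≤ p from by omega, show (18:Int) ≤ p from by omega, show (28:Int) ≤ p from by omega, show (36:Int) ≤ p from by omega, show (46:Int) ≤ p from by omega, if_true, if_false, ite_true, ite_false]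
  omega

-- A's running fold, generalized over the accumulator, equals the accumulator plus B's closed form
theorem pvFold_eq (points : List Int) (h : ∀ p ∈ points, 0 ≤ p) (acc : Int) :
    points.foldl (fun pts p =>
      if p > 45 then pts + (-5)
      else if p > 35 then pts + (-3)
      else if p > 27 then pts + (-1)
      else if p > 17 then pts + 0
      else if p > 14 then pts + 1
      else if p > 6 then pts + 3
      else if p > 0 then pts + 4
      else if p = 0 then pts + 5
      else pts) acc
    = acc + (5 * points.length
        - (points.countP (fun v => (1:Int) ≤ v) : Int)
        - (points.countP (fun v => (7:Int) ≤ v) : Int)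
        - 2 * (points.countP (fun v => (15:Int) ≤ v) : Int)
        - (points.countP (fun v => (18:Int) ≤ v) : Int)
        - (points.countP (fun v => (28:Int) ≤ v) : Int)
        - 2 * (points.countP (fun v => (36:Int) ≤ v) : Int)
        - 2 * (points.countP (fun v => (46:Int) ≤ v) : Int)) := by
  induction points generalizing acc with
  | nil => simp [List.foldl_nil]
  | cons p rest ih =>
    have hp : 0 ≤ p := h p (by simp)
    simp only [List.foldl_cons, List.countP_cons, List.length_cons]
    rw [pvStepVal acc p hp, ih (fun q hq => h q (by simp [hq]))]
    push_cast [decide_eq_true_eq]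
    ring

-- ===== VERDICT (by name: the statement is the Claim_ definition above) =====
theorem scorePointsAllowed_spec : Claim_equal_scorePointsAllowed := by
  intro points _ hpre
  unfold Pre_scorePointsAllowed at hpre
  have hall : ∀ p ∈ points, (0:Int) ≤ p := by simpa [List.all_eq_true] using hpre
  have hneg : points.any (fun v => v < 0) = false := by
    simp only [List.any_eq_false, decide_eq_true_eq]
    intro v hv; exact not_lt.mpr (hall v hv)
  unfold Spec_scorePointsAllowed scorePointsAllowed
  rw [pvAlt_closed points hneg, pvFold_eq points hall 0, zero_add]
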